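-- pv_equiv track=rewrite | github.com/Save1ik/urfu-python | buns/mod3/task9.py | get_location_robot
-- ===== SOURCE A (Python) =====
-- def get_location_robot(steps):
--     moves = [(0, 1), (-1, 0), (0, -1), (1, 0)]
--     current_move = 0
--     x, y = 0, 0
--
--     for i in range(1, steps + 1):
--         move = moves[current_move % 4]
--         x += move[0]
--         y += move[1]
--
--         if (i % 2 == 0) and (i // 2 % 4 == 0 or i // 2 % 4 == 2):
--             current_move = (current_move + 1) % 4
--
--     return (x, y)
-- ===== SOURCE B (Python) =====
-- def get_location_robot(steps):
--     # O(1): the walk is periodic with period 16 (4 steps in each of N, W, S, E,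
--     # net zero per cycle); only the remainder of steps mod 16 matters.
--     if steps <= 0:
--         return (0, 0)
--     r = steps % 16
--     q, m = divmod(r, 4)          # q completed legs, m steps into current leg
--     corners = [(0, 0), (0, 4), (-4, 4), (-4, 0)]
--     dirs = [(0, 1), (-1, 0), (0, -1), (1, 0)]
--     cx, cy = corners[q]
--     dx, dy = dirs[q]
--     return (cx + m * dx, cy + m * dy)
-- ===== Notes on version B (the rewrite author's own statement) =====
-- stated objective: faster
-- what changed: A simulates every step of the walk in a loop; B uses the fact that the walk is periodic with period 16 (4 steps in each of the 4 directions, net zero per cycle) and computes the position from steps % 16 by a table lookup in O(1).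
import Mathlib
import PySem

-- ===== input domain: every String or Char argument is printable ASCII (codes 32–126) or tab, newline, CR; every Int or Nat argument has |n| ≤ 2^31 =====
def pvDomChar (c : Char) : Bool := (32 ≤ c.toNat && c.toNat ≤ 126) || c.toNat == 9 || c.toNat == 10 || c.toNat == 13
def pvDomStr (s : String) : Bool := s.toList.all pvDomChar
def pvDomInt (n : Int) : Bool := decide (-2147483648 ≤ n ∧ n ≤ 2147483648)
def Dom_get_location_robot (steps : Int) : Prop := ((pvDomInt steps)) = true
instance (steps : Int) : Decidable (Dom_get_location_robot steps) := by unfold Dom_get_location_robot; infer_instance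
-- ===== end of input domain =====

-- B replaces A's O(steps) step-by-step simulation by an O(1) lookup: the walk is
-- periodic with period 16 (net zero per cycle), so only steps % 16 matters.


-- ===== PORT A =====
-- loop body of A; state is (current_move, x, y).  moves[current_move % 4] can
-- never miss (current_move stays in 0..3), so the .getD default is unreachable.
def pvStepA (st : Int × Int × Int) (i : Int) : Int × Int × Int :=
  let move := (PySem.List.pyGet? [((0:Int),(1:Int)), (-1,0), (0,-1), (1,0)]
                (PySem.Int.mod st.1 4)).getD (0, 0)
  let x := st.2.1 + move.1
  let y := st.2.2 + move.2
  let cm := if PySem.Int.mod i 2 = 0 ∧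
               (PySem.Int.mod (PySem.Int.floordiv i 2) 4 = 0 ∨
                PySem.Int.mod (PySem.Int.floordiv i 2) 4 = 2)
            then PySem.Int.mod (st.1 + 1) 4 else st.1
  (cm, x, y)

def get_location_robot (steps : Int) : List Int :=
  let s := (PySem.List.pyRange 1 (steps + 1) 1).foldl pvStepA (0, 0, 0)
  [s.2.1, s.2.2]

-- ===== PORT B =====
def get_location_robot_alt (steps : Int) : List Int :=
  if steps ≤ 0 then [0, 0]
  else
    let r := PySem.Int.mod steps 16
    let q := PySem.Int.floordiv r 4
    let m := PySem.Int.mod r 4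
    let corners : List (Int × Int) := [(0, 0), (0, 4), (-4, 4), (-4, 0)]
    let dirs : List (Int × Int) := [(0, 1), (-1, 0), (0, -1), (1, 0)]
    let c := (PySem.List.pyGet? corners q).getD (0, 0)
    let d := (PySem.List.pyGet? dirs q).getD (0, 0)
    [c.1 + m * d.1, c.2 + m * d.2]

-- ===== PRECONDITION & SPEC =====
def Spec_get_location_robot (steps : Int) (out : List Int) : Prop := out = get_location_robot_alt steps
instance (steps : Int) (out : List Int) : Decidable (Spec_get_location_robot steps out) := by unfold Spec_get_location_robot; infer_instance

-- ===== CLAIM (what is proved, stated in full; the proofs are below) =====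
def Claim_equal_get_location_robot : Prop := ∀ (steps : Int), Dom_get_location_robot steps → Spec_get_location_robot steps (get_location_robot steps)

-- ===== LEMMAS AND PROOFS =====

-- A's loop state after n steps, as a function of n % 16 (the walk has period 16).
def pvTbl (r : Nat) : Int × Int × Int :=
  match r with
  | 0 => (0, 0, 0)   | 1 => (0, 0, 1)   | 2 => (0, 0, 2)   | 3 => (0, 0, 3)
  | 4 => (1, 0, 4)   | 5 => (1, -1, 4)  | 6 => (1, -2, 4)  | 7 => (1, -3, 4)
  | 8 => (2, -4, 4)  | 9 => (2, -4, 3)  | 10 => (2, -4, 2) | 11 => (2, -4, 1)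
  | 12 => (3, -4, 0) | 13 => (3, -3, 0) | 14 => (3, -2, 0) | _ => (3, -1, 0)

-- The turning condition at step i = n+1 holds iff (n+1) % 4 = 0.
lemma pvCondA (n : Nat) :
    (PySem.Int.mod ((n : Int) + 1) 2 = 0 ∧
      (PySem.Int.mod (PySem.Int.floordiv ((n : Int) + 1) 2) 4 = 0 ∨
       PySem.Int.mod (PySem.Int.floordiv ((n : Int) + 1) 2) 4 = 2)) ↔ (n + 1) % 4 = 0 := by
  have h : ((n : Int) + 1) = ((n + 1 : Nat) : Int) := by push_cast; ring
  have hm2 : PySem.Int.mod ((n + 1 : Nat) : Int) 2 = (((n + 1) % 2 : Nat) : Int) := by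
    exact_mod_cast PySem.Int.mod_natCast (n + 1) 2
  have hfd : PySem.Int.floordiv ((n + 1 : Nat) : Int) 2 = (((n + 1) / 2 : Nat) : Int) := by
    exact_mod_cast PySem.Int.floordiv_natCast (n + 1) 2
  have hm4 : PySem.Int.mod (((n + 1) / 2 : Nat) : Int) 4 = (((n + 1) / 2 % 4 : Nat) : Int) := by
    exact_mod_cast PySem.Int.mod_natCast ((n + 1) / 2) 4
  rw [h, hm2, hfd, hm4]
  omega

-- One step of A's loop from the tabulated state, with the condition already
-- reduced to its residue form: a finite check over r < 16.
lemma pvKey (r : Nat) (hr : r < 16) (i : Int)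
    (hcond : (PySem.Int.mod i 2 = 0 ∧
      (PySem.Int.mod (PySem.Int.floordiv i 2) 4 = 0 ∨
       PySem.Int.mod (PySem.Int.floordiv i 2) 4 = 2)) ↔ (r + 1) % 4 = 0) :
    pvStepA (pvTbl r) i = pvTbl ((r + 1) % 16) := by
  unfold pvStepA
  rw [if_congr hcond rfl rfl]
  interval_cases r <;> decide

lemma pvStep_tbl (n : Nat) : pvStepA (pvTbl (n % 16)) ((n : Int) + 1) = pvTbl ((n + 1) % 16) := by
  have h1 : (n + 1) % 16 = (n % 16 + 1) % 16 := by omega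
  have h2 : ((n + 1) % 4 = 0) ↔ ((n % 16 + 1) % 4 = 0) := by omega
  rw [h1]
  exact pvKey (n % 16) (Nat.mod_lt _ (by omega)) _ ((pvCondA n).trans h2)

lemma pvFoldA (n : Nat) :
    (PySem.List.pyRange 1 ((n : Int) + 1) 1).foldl pvStepA (0, 0, 0) = pvTbl (n % 16) := by
  induction n with
  | zero => rw [PySem.List.pyRange_one_eq_nil (by norm_num)]; rfl
  | succ k ih =>
    have h : ((k + 1 : Nat) : Int) + 1 = ((k : Int) + 1) + 1 := by push_cast; ring
    rw [h, PySem.List.pyRange_one_succ_right (by omega), List.foldl_append, ih]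
    simpa using pvStep_tbl k

lemma pvAltEq (n : Nat) (h : 1 ≤ n) :
    get_location_robot_alt (n : Int) = [(pvTbl (n % 16)).2.1, (pvTbl (n % 16)).2.2] := by
  have hm : PySem.Int.mod (n : Int) 16 = ((n % 16 : Nat) : Int) := by
    exact_mod_cast PySem.Int.mod_natCast n 16
  unfold get_location_robot_alt
  rw [if_neg (by omega : ¬ (n : Int) ≤ 0)]
  simp only [hm]
  have hlt : n % 16 < 16 := Nat.mod_lt _ (by omega)
  set r := n % 16 with hrdef
  clear_value r
  interval_cases r <;> decide

-- ===== VERDICT (by name: the statement is the Claim_ definition above) =====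
theorem get_location_robot_spec : Claim_equal_get_location_robot := by
  intro steps _
  unfold Spec_get_location_robot
  by_cases h : steps ≤ 0
  · unfold get_location_robot get_location_robot_alt
    rw [PySem.List.pyRange_one_eq_nil (by omega), if_pos h]
    rfl
  · obtain ⟨n, hn⟩ : ∃ n : Nat, steps = (n : Int) :=
      ⟨steps.toNat, (Int.toNat_of_nonneg (by omega)).symm⟩
    have h1 : 1 ≤ n := by omega
    subst hn
    unfold get_location_robot
    rw [pvFoldA n, pvAltEq n h1]
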